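-- pv_equiv track=rewrite | github.com/hxse/ccxt-proxy2 | minimal_example/chunk_calculator.py | get_chunk_slices
-- ===== SOURCE A (Python) =====
-- from typing import List, Tuple
--
-- def get_chunk_slices(
--     total_rows: int, cache_size: int, forward: bool
-- ) -> List[Tuple[int, int]]:
--     """
--     计算正向或反向写入时每个文件块的切片范围。
--
--     Args:
--         total_rows (int): 总数据行数。
--         cache_size (int): 每个缓存文件存储的数据行数。
--         forward (bool): 写入方向。True 为正向，False 为反向。
--
--     Returns:
--         List[Tuple[int, int]]: 包含每个文件块切片范围 (start_index, end_index) 的列表。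
--     """
--     if total_rows <= 0 or cache_size <= 0:
--         return []
--
--     if cache_size == 1:
--         # 特殊处理 cache_size=1 的情况
--         slices = [(i, i + 1) for i in range(total_rows)]
--         # 对于正向和反向，切片相同，无需去除任何切片
--         return slices
--
--     if forward:
--         step = cache_size - 1
--         slices = [
--             (start, min(start + cache_size, total_rows))
--             for start in range(0, total_rows, step)
--         ]
--         # 去除最后一个长度为1的切片（当切片数大于1时）
--         if len(slices) > 1 and slices[-1][1] - slices[-1][0] == 1:
--             slices = slices[:-1]
--         return slices
--     else:
--         step = cache_size - 1
--         first_chunk_size = (total_rows - 1) % step + 1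
--
--         # 确定剩余切片的数量
--         remaining_rows = total_rows - first_chunk_size
--         num_remaining_chunks = remaining_rows // step
--         if remaining_rows % step > 0:
--             num_remaining_chunks += 1
--
--         # 构建第一个切片
--         first_slice = [(0, first_chunk_size)]
--
--         # 构建剩余切片
--         remaining_slices = [
--             (
--                 first_chunk_size - 1 + i * step,
--                 min(first_chunk_size - 1 + i * step + cache_size, total_rows),
--             )
--             for i in range(num_remaining_chunks)
--         ]
--
--         # 合并切片
--         slices = first_slice + remaining_slices
--
--         # 去除第一个长度为1的切片（当切片数大于1时）
--         if len(slices) > 1 and slices[0][1] - slices[0][0] == 1: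
--             slices = slices[1:]
--
--         return slices
-- ===== SOURCE B (Python) =====
-- from typing import List, Tuple
--
-- def get_chunk_slices(
--     total_rows: int, cache_size: int, forward: bool
-- ) -> List[Tuple[int, int]]:
--     if total_rows <= 0 or cache_size <= 0:
--         return []
--
--     if cache_size == 1:
--         return [(i, i + 1) for i in range(total_rows)]
--
--     if forward:
--         slices = []
--         start = 0
--         while start < total_rows:
--             if slices and start == total_rows - 1:
--                 break
--             slices.append((start, min(start + cache_size, total_rows)))
--             start += cache_size - 1
--         return slices
--     else:
--         slices = []
--         end = total_rows
--         while True: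
--             start = max(0, end - cache_size)
--             slices.append((start, end))
--             if start == 0:
--                 break
--             end = start + 1
--         slices.reverse()
--         return slices
-- ===== Notes on version B (the rewrite author's own statement) =====
-- stated objective: alternative
-- what changed: The forward comprehension-over-range plus post-trim becomes a single-pass cursor loop that stops before emitting the degenerate length-1 final chunk; the reverse branch's modulo/closed-form chunk arithmetic plus post-trim becomes a backward traversal from end=total_rows that appends (max(0,end-cache_size), end) until start hits 0 and then reverses the list.
import Mathlib
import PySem

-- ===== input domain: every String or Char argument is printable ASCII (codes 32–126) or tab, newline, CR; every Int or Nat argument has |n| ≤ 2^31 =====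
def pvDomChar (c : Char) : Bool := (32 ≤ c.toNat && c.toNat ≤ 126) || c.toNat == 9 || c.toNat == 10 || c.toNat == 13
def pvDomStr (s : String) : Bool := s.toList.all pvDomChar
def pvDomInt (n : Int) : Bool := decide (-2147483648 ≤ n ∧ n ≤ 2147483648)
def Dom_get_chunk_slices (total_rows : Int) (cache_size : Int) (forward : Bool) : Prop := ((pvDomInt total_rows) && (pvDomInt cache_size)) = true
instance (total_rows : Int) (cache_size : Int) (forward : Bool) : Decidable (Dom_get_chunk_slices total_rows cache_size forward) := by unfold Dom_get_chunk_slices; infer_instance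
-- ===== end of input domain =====

-- B replaces the range-comprehension-plus-post-trim chunking by cursor loops (forward: stop
-- before a degenerate final chunk; reverse: walk backwards from total_rows and reverse); same
-- return value on every input, both sides total.

-- ===== PORT A =====
def get_chunk_slices (total_rows : Int) (cache_size : Int) (forward : Bool) : List (Int × Int) :=
  if total_rows ≤ 0 ∨ cache_size ≤ 0 then []
  else if cache_size = 1 then
    (PySem.List.pyRange 0 total_rows 1).map (fun i => (i, i + 1))
  else if forward then
    let step := cache_size - 1
    let slices := (PySem.List.pyRange 0 total_rows step).map
      (fun start => (start, min (start + cache_size) total_rows))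
    if decide (1 < slices.length) &&
        (match PySem.List.pyGet? slices (-1) with
          | some p => decide (p.2 - p.1 = 1)
          | none => false) then
      PySem.List.slice slices none (some (-1))
    else slices
  else
    let step := cache_size - 1
    let first_chunk_size := PySem.Int.mod (total_rows - 1) step + 1
    let remaining_rows := total_rows - first_chunk_size
    let num0 := PySem.Int.floordiv remaining_rows step
    let num_remaining_chunks := if 0 < PySem.Int.mod remaining_rows step then num0 + 1 else num0
    let first_slice : List (Int × Int) := [(0, first_chunk_size)]
    let remaining_slices := (PySem.List.pyRange 0 num_remaining_chunks 1).map
      (fun i => (first_chunk_size - 1 + i * step,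
                 min (first_chunk_size - 1 + i * step + cache_size) total_rows))
    let slices := first_slice ++ remaining_slices
    if decide (1 < slices.length) &&
        (match PySem.List.pyGet? slices 0 with
          | some p => decide (p.2 - p.1 = 1)
          | none => false) then
      PySem.List.slice slices (some 1) none
    else slices

-- ===== PORT B =====
-- forward while-loop: push (start, min (start+cache_size, total_rows)) unless this would be a
-- degenerate length-1 final chunk after at least one chunk. `fuel` only bounds the structural
-- recursion; total_rows.toNat + 1 suffices, since the cursor advances by cache_size - 1 ≥ 1
-- per iteration (callers always have 2 ≤ cache_size), so it never truncates the loop.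
def fwdLoop (fuel : Nat) (total_rows : Int) (cache_size : Int) (start : Int)
    (acc : List (Int × Int)) : List (Int × Int) :=
  match fuel with
  | 0 => acc
  | fuel + 1 =>
    if start < total_rows then
      if acc ≠ [] ∧ start = total_rows - 1 then acc
      else fwdLoop fuel total_rows cache_size (start + (cache_size - 1))
        (acc ++ [(start, min (start + cache_size) total_rows)])
    else acc

-- reverse do-while loop over the end cursor; `fuel` only bounds the structural recursion
-- (total_rows.toNat + 1 suffices: the cursor drops by cache_size - 1 ≥ 1 per iteration).
def revLoop (fuel : Nat) (cache_size : Int) (e : Int) (acc : List (Int × Int)) :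
    List (Int × Int) :=
  match fuel with
  | 0 => acc
  | fuel + 1 =>
    let s := max 0 (e - cache_size)
    if s = 0 then acc ++ [(s, e)]
    else revLoop fuel cache_size (s + 1) (acc ++ [(s, e)])

def get_chunk_slices_alt (total_rows : Int) (cache_size : Int) (forward : Bool) : List (Int × Int) :=
  if total_rows ≤ 0 ∨ cache_size ≤ 0 then []
  else if cache_size = 1 then
    (PySem.List.pyRange 0 total_rows 1).map (fun i => (i, i + 1))
  else if forward then
    fwdLoop (total_rows.toNat + 1) total_rows cache_size 0 []
  else
    (revLoop (total_rows.toNat + 1) cache_size total_rows []).reverse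

-- ===== PRECONDITION & SPEC =====
def Spec_get_chunk_slices (total_rows : Int) (cache_size : Int) (forward : Bool) (out : List (Int × Int)) : Prop := out = get_chunk_slices_alt total_rows cache_size forward
instance (total_rows : Int) (cache_size : Int) (forward : Bool) (out : List (Int × Int)) : Decidable (Spec_get_chunk_slices total_rows cache_size forward out) := by unfold Spec_get_chunk_slices; infer_instance

-- ===== CLAIM (what is proved, stated in full; the proofs are below) =====
def Claim_equal_get_chunk_slices : Prop := ∀ (total_rows : Int) (cache_size : Int) (forward : Bool), Dom_get_chunk_slices total_rows cache_size forward → Spec_get_chunk_slices total_rows cache_size forward (get_chunk_slices total_rows cache_size forward)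

-- ===== LEMMAS AND PROOFS =====

lemma pyRange_nil_pos (a b s : Int) (hs : 0 < s) (hab : b ≤ a) :
    PySem.List.pyRange a b s = [] := by
  rw [PySem.List.pyRange_of_pos a b hs]
  simp [show ¬ a < b by omega]


lemma pyRange_cons_pos (a b s : Int) (hs : 0 < s) (hab : a < b) :
    PySem.List.pyRange a b s = a :: PySem.List.pyRange (a + s) b s := by
  rw [PySem.List.pyRange_of_pos a b hs, PySem.List.pyRange_of_pos (a+s) b hs]
  have hq : 0 ≤ (b - a - 1) / s := Int.ediv_nonneg (by omega) (by omega)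
  have h1 : b - a + s - 1 = (b - a - 1) + 1 * s := by ring
  have h2 : (b - a + s - 1) / s = (b - a - 1) / s + 1 := by
    rw [h1, Int.add_mul_ediv_right _ _ (by omega)]
  by_cases hlt : a + s < b
  · have h3 : b - (a + s) + s - 1 = b - a - 1 := by ring
    rw [if_pos hab, if_pos hlt, h2, h3]
    have : ((b - a - 1) / s + 1).toNat = ((b-a-1)/s).toNat + 1 := by omega
    rw [this, List.range_succ_eq_map]
    simp only [List.map_cons, List.map_map]
    congr 1
    · simp
    · apply List.map_congr_left
      intro k _
      simp [Function.comp, Nat.succ_eq_add_one]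
      ring
  · have h0 : (b - a - 1) / s = 0 := Int.ediv_eq_zero_of_lt (by omega) (by omega)
    rw [if_pos hab, if_neg hlt, h2, h0]
    simp

-- reference chunk stream for the forward branch: `hp` records whether a chunk exists already
def fwdSpec (fuel : Nat) (total_rows : Int) (cache_size : Int) (a : Int) (hp : Bool) :
    List (Int × Int) :=
  match fuel with
  | 0 => []
  | fuel + 1 =>
    if a < total_rows ∧ (hp = false ∨ a + 1 < total_rows) then
      (a, min (a + cache_size) total_rows) :: fwdSpec fuel total_rows cache_size (a + (cache_size - 1)) true
    else []

-- A's forward post-trim, generalised by `hp` = "the list shown is a proper suffix"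
def trimB (hp : Bool) (L : List (Int × Int)) : List (Int × Int) :=
  if (hp || decide (1 < L.length)) &&
      (match L.getLast? with | some p => decide (p.2 - p.1 = 1) | none => false) then
    L.dropLast
  else L


lemma fwdSpec_nil (fuel : Nat) (total_rows cache_size a : Int) (hp : Bool)
    (h : ¬ a < total_rows) : fwdSpec fuel total_rows cache_size a hp = [] := by
  cases fuel with
  | zero => rfl
  | succ f => rw [fwdSpec, if_neg (fun hc => h hc.1)]

lemma fwdLoop_spec (total_rows cache_size : Int) :
    ∀ (fuel : Nat) (a : Int) (acc : List (Int × Int)),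
      fwdLoop fuel total_rows cache_size a acc
        = acc ++ fwdSpec fuel total_rows cache_size a (!acc.isEmpty) := by
  intro fuel
  induction fuel with
  | zero => intro a acc; simp [fwdLoop, fwdSpec]
  | succ f ih =>
      intro a acc
      rw [fwdLoop, fwdSpec]
      by_cases hlt : a < total_rows
      · by_cases hbrk : acc ≠ [] ∧ a = total_rows - 1
        · rw [if_pos hlt, if_pos hbrk]
          have hps : (!acc.isEmpty) = true := by simpa using hbrk.1
          rw [hps, if_neg (by simp; omega)]
          simp
        · rw [if_pos hlt, if_neg hbrk, ih]
          have hne : (!(acc ++ [(a, min (a + cache_size) total_rows)]).isEmpty) = true := by simp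
          rw [hne]
          have hcond : a < total_rows ∧ ((!acc.isEmpty) = false ∨ a + 1 < total_rows) := by
            refine ⟨hlt, ?_⟩
            by_cases hacc : acc = []
            · left; simp [hacc]
            · right
              have : ¬ a = total_rows - 1 := fun hh => hbrk ⟨hacc, hh⟩
              omega
          rw [if_pos hcond]
          simp
      · rw [if_neg hlt, if_neg (fun hc => hlt hc.1)]
        simp

lemma trimB_cons (hp : Bool) (x : Int × Int) (L : List (Int × Int)) (hL : L ≠ []) :
    trimB hp (x :: L) = x :: trimB true L := by
  unfold trimB
  have h1 : (x :: L).getLast? = L.getLast? := by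
    cases L with
    | nil => simp at hL
    | cons y ys => simp
  have h2 : (hp || decide (1 < (x :: L).length)) = true := by
    have : 1 ≤ L.length := List.length_pos_iff.mpr hL
    simp; omega
  rw [h1, h2]
  have h3 : (x :: L).dropLast = x :: L.dropLast := List.dropLast_cons_of_ne_nil hL
  cases hl : L.getLast? with
  | none => simp_all
  | some p =>
      by_cases hd : p.2 - p.1 = 1
      · simp [hd, h3]
      · simp [hd]


lemma A_fwd_char (total_rows cache_size : Int) (hc : 0 < cache_size - 1) :
    ∀ (fuel : Nat) (a : Int) (hp : Bool), a < total_rows → (total_rows - a).toNat < fuel →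
      trimB hp ((PySem.List.pyRange a total_rows (cache_size - 1)).map
        (fun start => (start, min (start + cache_size) total_rows)))
      = fwdSpec fuel total_rows cache_size a hp := by
  intro fuel
  induction fuel with
  | zero => omega
  | succ f ih =>
      intro a hp ha hfuel
      rw [fwdSpec]
      by_cases hcnd : a < total_rows ∧ (hp = false ∨ a + 1 < total_rows)
      · rw [if_pos hcnd]
        rw [pyRange_cons_pos a total_rows (cache_size - 1) (by omega) ha, List.map_cons]
        by_cases hlt : a + (cache_size - 1) < total_rows
        · have hne : (PySem.List.pyRange (a + (cache_size - 1)) total_rows (cache_size - 1)).map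
              (fun start => (start, min (start + cache_size) total_rows)) ≠ [] := by
            rw [pyRange_cons_pos _ total_rows (cache_size - 1) (by omega) hlt]
            simp
          rw [trimB_cons hp _ _ hne, ih _ true hlt (by omega)]
        · rw [pyRange_nil_pos _ total_rows (cache_size - 1) (by omega) (by omega), List.map_nil]
          rw [fwdSpec_nil f total_rows cache_size _ true (by omega)]
          unfold trimB
          have hmin : min (a + cache_size) total_rows = total_rows := by omega
          simp only [List.getLast?_singleton, hmin]
          rcases hcnd with ⟨h1, h2 | h2⟩
          · simp [h2]
          · have : ¬ (total_rows - a = 1) := by omega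
            simp [this]
      · rw [if_neg hcnd]
        have hhp : hp = true := by
          cases hp
          · exact absurd ⟨ha, Or.inl rfl⟩ hcnd
          · rfl
        have ha1 : a = total_rows - 1 := by
          by_contra hne
          exact hcnd ⟨ha, Or.inr (by omega)⟩
        rw [pyRange_cons_pos a total_rows _ (by omega) ha,
            pyRange_nil_pos _ total_rows _ (by omega) (by omega)]
        unfold trimB
        have hmin : min (a + cache_size) total_rows = total_rows := by omega
        have hlen : total_rows - a = 1 := by omega
        simp [hhp, hmin, hlen]

-- reference chunk stream for the reverse branch, in appended (reversed) order
def revSpec (fuel : Nat) (cache_size : Int) (e : Int) : List (Int × Int) :=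
  match fuel with
  | 0 => []
  | fuel + 1 =>
    if e - cache_size ≤ 0 then [(0, e)]
    else (e - cache_size, e) :: revSpec fuel cache_size (e - cache_size + 1)


lemma revLoop_spec (cache_size : Int) :
    ∀ (fuel : Nat) (e : Int) (acc : List (Int × Int)),
      revLoop fuel cache_size e acc = acc ++ revSpec fuel cache_size e := by
  intro fuel
  induction fuel with
  | zero => intro e acc; simp [revLoop, revSpec]
  | succ f ih =>
      intro e acc
      rw [revLoop, revSpec]
      by_cases hle : e - cache_size ≤ 0
      · have hmax : max 0 (e - cache_size) = 0 := by omega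
        simp only [hmax]
        rw [if_pos trivial, if_pos hle]
      · have hmax : max 0 (e - cache_size) = e - cache_size := by omega
        simp only [hmax]
        rw [if_neg (by omega), if_neg hle, ih]
        simp

lemma revSpec_reverse (cache_size : Int) (hc : 0 < cache_size - 1) :
    ∀ (fuel : Nat) (e : Int), 0 < e → e.toNat ≤ fuel →
      (revSpec fuel cache_size e).reverse =
        (if PySem.Int.mod (e - 1) (cache_size - 1) = 0 ∧ 1 ≤ PySem.Int.floordiv (e - 1) (cache_size - 1)
          then []
          else [((0 : Int), PySem.Int.mod (e - 1) (cache_size - 1) + 1)]) ++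
        (PySem.List.pyRange 0 (PySem.Int.floordiv (e - 1) (cache_size - 1)) 1).map
          (fun i => (PySem.Int.mod (e - 1) (cache_size - 1) + i * (cache_size - 1),
                     PySem.Int.mod (e - 1) (cache_size - 1) + (i + 1) * (cache_size - 1) + 1)) := by
  intro fuel
  have hs : 0 < cache_size - 1 := hc
  induction fuel with
  | zero => omega
  | succ f ih =>
      intro e he hfuel
      rw [revSpec]
      by_cases hle : e - cache_size ≤ 0
      case pos =>
        rw [if_pos hle]
        -- 1 ≤ e ≤ cache_size
        rw [PySem.Int.mod_eq_emod_of_pos hs, PySem.Int.floordiv_eq_ediv_of_pos hs]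
        by_cases hlt : e - 1 < cache_size - 1
        · have hF : (e - 1) % (cache_size - 1) = e - 1 := Int.emod_eq_of_lt (by omega) hlt
          have hq : (e - 1) / (cache_size - 1) = 0 := Int.ediv_eq_zero_of_lt (by omega) hlt
          rw [hF, hq]
          rw [PySem.List.pyRange_one_eq_nil (by omega)]
          simp
        · have he1 : e - 1 = cache_size - 1 := by omega
          have hF : (e - 1) % (cache_size - 1) = 0 := by rw [he1, Int.emod_self]
          have hq : (e - 1) / (cache_size - 1) = 1 := by rw [he1]; exact Int.ediv_self (by omega)
          rw [hF, hq]
          have hr : PySem.List.pyRange 0 1 1 = [0] := by decide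
          simp [hr]
          omega
      case neg =>
        rw [if_neg hle]
        have hgt : ¬ e - cache_size ≤ 0 := hle
        have he' : 0 < e - cache_size + 1 := by omega
        simp only [PySem.Int.mod_eq_emod_of_pos hs, PySem.Int.floordiv_eq_ediv_of_pos hs] at ih ⊢
        rw [List.reverse_cons, ih (e - cache_size + 1) he' (by omega)]
        have harg : e - cache_size + 1 - 1 = (e - 1) - (cache_size - 1) := by ring
        set F := (e - 1) % (cache_size - 1) with hFdef
        set q := (e - 1) / (cache_size - 1) with hqdef
        have hF : (e - cache_size + 1 - 1) % (cache_size - 1) = F := by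
          rw [harg, Int.sub_emod_right]
        have hq : (e - cache_size + 1 - 1) / (cache_size - 1) = q - 1 := by
          rw [harg]
          have h2 : e - 1 - (cache_size - 1) = (e - 1) + (-1) * (cache_size - 1) := by ring
          rw [h2, Int.add_mul_ediv_right _ _ (by omega)]
          ring
        rw [hF, hq]
        have hsum : (cache_size - 1) * q + F = e - 1 := Int.mul_ediv_add_emod _ _
        have hFpos : 0 ≤ F := Int.emod_nonneg _ (by omega)
        have hFlt : F < cache_size - 1 := Int.emod_lt_of_pos _ hs
        have hq1 : 1 ≤ q := by nlinarith
        have hq0 : F = 0 → 2 ≤ q := by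
          intro h0
          by_contra hcon
          have : q = 1 := by omega
          nlinarith
        have hpre : (if F = 0 ∧ 1 ≤ q - 1 then ([] : List (Int × Int)) else [((0:Int), F + 1)]) =
            (if F = 0 ∧ 1 ≤ q then ([] : List (Int × Int)) else [((0:Int), F + 1)]) := by
          by_cases h0 : F = 0
          · have h2 := hq0 h0
            have ha : (1:Int) ≤ q - 1 := by omega
            have hb : (1:Int) ≤ q := by omega
            simp [h0, ha, hb]
          · simp [h0]
        rw [hpre]
        have hsplit : PySem.List.pyRange 0 q 1 = PySem.List.pyRange 0 (q - 1) 1 ++ [q - 1] := by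
          have h3 := PySem.List.pyRange_one_succ_right (a := 0) (b := q - 1) (by omega)
          rw [show q - 1 + 1 = q by ring] at h3
          exact h3
        rw [hsplit, List.map_append]
        have hl1 : F + (q - 1) * (cache_size - 1) = e - cache_size := by nlinarith
        have hl2 : F + (q - 1 + 1) * (cache_size - 1) + 1 = e := by nlinarith
        simp [List.append_assoc, hl1]
        nlinarith

lemma main_eq (total_rows cache_size : Int) (forward : Bool) :
    get_chunk_slices total_rows cache_size forward
      = get_chunk_slices_alt total_rows cache_size forward := by
  unfold get_chunk_slices get_chunk_slices_alt
  by_cases h1 : total_rows ≤ 0 ∨ cache_size ≤ 0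
  · simp [h1]
  · rw [if_neg h1, if_neg h1]
    by_cases h2 : cache_size = 1
    · simp [h2]
    · rw [if_neg h2, if_neg h2]
      have hc : 0 < cache_size - 1 := by omega
      have hT : 0 < total_rows := by omega
      cases forward with
      | true =>
          simp only [reduceIte]
          have hB : fwdLoop (total_rows.toNat + 1) total_rows cache_size 0 []
              = fwdSpec (total_rows.toNat + 1) total_rows cache_size 0 false := by
            rw [fwdLoop_spec]; simp
          rw [hB, ← A_fwd_char total_rows cache_size hc (total_rows.toNat + 1) 0 false hT (by omega)]
          unfold trimB
          rw [PySem.List.slice_to_neg_one]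
          have hget : ∀ (L : List (Int × Int)), PySem.List.pyGet? L (-1) = L.getLast? := by
            intro L; simp [pysem]
          simp [hget]
      | false =>
          simp only [Bool.false_eq_true, if_false]
          have hB : (revLoop (total_rows.toNat + 1) cache_size total_rows []).reverse
              = (revSpec (total_rows.toNat + 1) cache_size total_rows).reverse := by
            rw [revLoop_spec]; simp
          rw [hB, revSpec_reverse cache_size hc (total_rows.toNat + 1) total_rows hT (by omega)]
          have hme : PySem.Int.mod (total_rows - 1) (cache_size - 1)
              = (total_rows - 1) % (cache_size - 1) := PySem.Int.mod_eq_emod_of_pos hc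
          have hfe : PySem.Int.floordiv (total_rows - 1) (cache_size - 1)
              = (total_rows - 1) / (cache_size - 1) := PySem.Int.floordiv_eq_ediv_of_pos hc
          set F := (total_rows - 1) % (cache_size - 1) with hFdef
          set q := (total_rows - 1) / (cache_size - 1) with hqdef
          have hde : (cache_size - 1) * q + F = total_rows - 1 := Int.mul_ediv_add_emod _ _
          have hFpos : 0 ≤ F := Int.emod_nonneg _ (by omega)
          have hFlt : F < cache_size - 1 := Int.emod_lt_of_pos _ hc
          have hqpos : 0 ≤ q := Int.ediv_nonneg (by omega) (by omega)
          have hrem : total_rows - (PySem.Int.mod (total_rows - 1) (cache_size - 1) + 1)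
              = (cache_size - 1) * q := by rw [hme]; linarith [hde]
          have hmod0 : PySem.Int.mod
              (total_rows - (PySem.Int.mod (total_rows - 1) (cache_size - 1) + 1))
              (cache_size - 1) = 0 := by
            rw [PySem.Int.mod_eq_emod_of_pos hc, hrem]
            exact Int.mul_emod_right _ _
          have hnum : PySem.Int.floordiv
              (total_rows - (PySem.Int.mod (total_rows - 1) (cache_size - 1) + 1))
              (cache_size - 1) = q := by
            rw [PySem.Int.floordiv_eq_ediv_of_pos hc, hrem]
            exact Int.mul_ediv_cancel_left _ (by omega)
          rw [hmod0, hnum]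
          simp only [lt_irrefl, if_false]
          -- rewrite the map function: the min never binds
          have hmap : (PySem.List.pyRange 0 q 1).map
                (fun i => (PySem.Int.mod (total_rows - 1) (cache_size - 1) + 1 - 1 + i * (cache_size - 1),
                  min (PySem.Int.mod (total_rows - 1) (cache_size - 1) + 1 - 1 + i * (cache_size - 1) + cache_size) total_rows))
              = (PySem.List.pyRange 0 q 1).map
                (fun i => (F + i * (cache_size - 1), F + (i + 1) * (cache_size - 1) + 1)) := by
            apply List.map_congr_left
            intro i hi
            rw [PySem.List.mem_pyRange_one] at hi
            have hiq : i + 1 ≤ q := by omega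
            have hmul : (i + 1) * (cache_size - 1) ≤ q * (cache_size - 1) :=
              mul_le_mul_of_nonneg_right hiq (by omega)
            have hle : F + 1 - 1 + i * (cache_size - 1) + cache_size ≤ total_rows := by nlinarith
            rw [hme, min_eq_left hle, Prod.mk.injEq]
            constructor <;> ring
          rw [hmap, hme]
          -- now both sides are about the same cons list; split on the trim condition
          have hlen : ((0, F + 1) :: (PySem.List.pyRange 0 q 1).map
              (fun i => (F + i * (cache_size - 1), F + (i + 1) * (cache_size - 1) + 1))).length
              = 1 + q.toNat := by
            simp [PySem.List.length_pyRange_one]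
            exact Nat.add_comm _ _
          by_cases hcond : F = 0 ∧ 1 ≤ q
          · have h1q : 1 ≤ q := hcond.2
            have hlt : 1 < 1 + q.toNat := by omega
            simp only [List.singleton_append]
            rw [if_pos (by simp [pysem, hcond.1]; omega)]
            rw [PySem.List.slice_from_one]
            simp [hcond, hfe]
          · simp only [List.singleton_append]
            rw [if_neg]
            · simp only [hfe]
              rw [if_neg hcond]
              simp
            · simp [pysem, hlen]
              intro hF0
              omega

-- ===== VERDICT (by name: the statement is the Claim_ definition above) =====
theorem get_chunk_slices_spec : Claim_equal_get_chunk_slices := by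
  intro total_rows cache_size forward _
  unfold Spec_get_chunk_slices
  exact main_eq total_rows cache_size forward
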